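-- pv_equiv track=rewrite | github.com/L-F-Z/vector-tools | test_cli.py | sort_wmobject_ids
-- ===== SOURCE A (Python) =====
-- def sort_wmobject_ids(ids):
--     preference = ['Charger','Cube','Aruco','Wall','Door','CustomCube','CustomMarker','Room','Face']
--
--     def key(id):
--         index = 0
--         for prefix in preference:
--             if id.startswith(prefix):
--                 break
--             else:
--                 index += 1
--         return ('%02d' % index) + id
--
--     result = sorted(ids, key=key)
--     return result
-- ===== SOURCE B (Python) =====
-- def sort_wmobject_ids(ids):
--     preference = ['Charger','Cube','Aruco','Wall','Door','CustomCube','CustomMarker','Room','Face']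
--     buckets = [[] for _ in range(10)]
--     for id in ids:
--         index = 9
--         for i, prefix in enumerate(preference):
--             if id.startswith(prefix):
--                 index = i
--                 break
--         buckets[index].append(id)
--     result = []
--     for bucket in buckets:
--         result.extend(sorted(bucket))
--     return result
-- ===== Notes on version B (the rewrite author's own statement) =====
-- stated objective: alternative
-- what changed: Replaces A's single sort under a composite two-digit-prefix string key by a grouping pass that appends each id to one of ten buckets by its first-matching-prefix index, then concatenates the ten buckets each sorted lexicographically by plain id.
import Mathlib
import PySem

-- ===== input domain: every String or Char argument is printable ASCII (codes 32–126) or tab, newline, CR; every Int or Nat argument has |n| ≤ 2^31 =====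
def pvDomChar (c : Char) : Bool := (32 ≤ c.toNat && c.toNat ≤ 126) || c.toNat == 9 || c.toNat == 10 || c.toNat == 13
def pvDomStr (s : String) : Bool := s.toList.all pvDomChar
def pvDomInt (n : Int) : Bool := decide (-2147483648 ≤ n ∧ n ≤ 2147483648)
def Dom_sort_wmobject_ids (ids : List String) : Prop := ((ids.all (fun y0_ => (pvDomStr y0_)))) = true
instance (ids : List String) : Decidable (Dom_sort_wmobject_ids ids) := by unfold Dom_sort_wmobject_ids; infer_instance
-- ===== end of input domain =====

-- B replaces A's single sort under a composite string key by a bucket-by-preference-index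
-- pass plus per-bucket plain sorts concatenated in index order (objective: alternative decomposition).

-- ===== PORT A =====
def pvPreference : List String :=
  ["Charger", "Cube", "Aruco", "Wall", "Door", "CustomCube", "CustomMarker", "Room", "Face"]

-- A's inner loop: 'index = 0; for prefix in preference: if id.startswith(prefix): break; else: index += 1'
def pvKeyIndex (id : String) : List String → Nat
  | [] => 0
  | p :: ps => if PySem.Str.startswith id p then 0 else pvKeyIndex id ps + 1

-- hand port of '%02d' % n, exact for 0 ≤ n ≤ 9 (index only takes values 0..9 here): '0' then the digit
def pvFmt02 (n : Nat) : String := String.ofList ['0', Char.ofNat (48 + n)]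

def pvKey (id : String) : String := pvFmt02 (pvKeyIndex id pvPreference) ++ id

def sort_wmobject_ids (ids : List String) : List String :=
  PySem.List.sorted ids pvKey false

-- ===== PORT B =====
-- B's inner loop: 'index = 9; for i, prefix in enumerate(preference): if id.startswith(prefix): index = i; break'
def pvPrefIndex (id : String) : List (Int × String) → Int
  | [] => 9
  | (i, p) :: ps => if PySem.Str.startswith id p then i else pvPrefIndex id ps

def sort_wmobject_ids_alt (ids : List String) : List String :=
  let buckets := ids.foldl
    (fun bs id =>
      let index := pvPrefIndex id (PySem.List.enumerate pvPreference)
      -- 'buckets[index].append(id)'; index is an enumerate index in 0..9, so .toNat is exact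
      bs.set index.toNat (bs.getD index.toNat [] ++ [id]))
    (List.replicate 10 [])
  buckets.foldl (fun result bucket => result ++ PySem.List.sorted bucket (fun x => x) false) []

-- ===== PRECONDITION & SPEC =====
def Spec_sort_wmobject_ids (ids : List String) (out : List String) : Prop := out = sort_wmobject_ids_alt ids
instance (ids : List String) (out : List String) : Decidable (Spec_sort_wmobject_ids ids out) := by unfold Spec_sort_wmobject_ids; infer_instance

-- ===== CLAIM (what is proved, stated in full; the proofs are below) =====
def Claim_equal_sort_wmobject_ids : Prop := ∀ (ids : List String), Dom_sort_wmobject_ids ids → Spec_sort_wmobject_ids ids (sort_wmobject_ids ids)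

-- ===== LEMMAS AND PROOFS =====

theorem keyIdx_le (id : String) : pvKeyIndex id pvPreference ≤ 9 := by
  simp only [pvPreference, pvKeyIndex]
  split_ifs <;> omega

theorem prefIndex_toNat (id : String) :
    (pvPrefIndex id (PySem.List.enumerate pvPreference)).toNat = pvKeyIndex id pvPreference := by
  simp only [pvPreference, PySem.List.enumerate_cons, PySem.List.enumerate_nil,
    pvPrefIndex, pvKeyIndex]
  split_ifs <;> rfl

theorem toList_pvKey (a : String) :
    (pvKey a).toList = '0' :: Char.ofNat (48 + pvKeyIndex a pvPreference) :: a.toList := by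
  simp [pvKey, pvFmt02]

theorem dch_lt {m n : Nat} (h : m < n) (hn : n ≤ 9) :
    Char.ofNat (48 + m) < Char.ofNat (48 + n) := by
  interval_cases n <;> interval_cases m <;> decide

theorem dch_inj {m n : Nat} (hm : m ≤ 9) (hn : n ≤ 9)
    (h : Char.ofNat (48 + m) = Char.ofNat (48 + n)) : m = n := by
  interval_cases m <;> interval_cases n <;> first | rfl | (exact absurd h (by decide))

theorem key_lt_iff (a b : String) :
    pvKey a < pvKey b ↔
      (pvKeyIndex a pvPreference < pvKeyIndex b pvPreference ∨
        (pvKeyIndex a pvPreference = pvKeyIndex b pvPreference ∧ a < b)) := by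
  have ha := keyIdx_le a
  have hb := keyIdx_le b
  rw [String.lt_iff_toList_lt, toList_pvKey, toList_pvKey, List.cons_lt_cons_iff]
  simp only [lt_self_iff_false, true_and, false_or, List.cons_lt_cons_iff]
  constructor
  · rintro (hlt | ⟨heq, hl⟩)
    · left
      rcases Nat.lt_trichotomy (pvKeyIndex a pvPreference) (pvKeyIndex b pvPreference) with h | h | h
      · exact h
      · exact absurd hlt (by rw [h]; exact lt_irrefl _)
      · exact absurd (dch_lt h ha) (lt_asymm hlt)
    · exact Or.inr ⟨dch_inj ha hb heq, String.lt_iff_toList_lt.mpr hl⟩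
  · rintro (hlt | ⟨heq, hab⟩)
    · exact Or.inl (dch_lt hlt hb)
    · exact Or.inr ⟨by rw [heq], String.lt_iff_toList_lt.mp hab⟩

theorem key_inj : Function.Injective pvKey := by
  intro a b h
  have h2 := congrArg String.toList h
  rw [toList_pvKey, toList_pvKey] at h2
  simp only [List.cons.injEq, true_and] at h2
  exact String.ext h2.2

theorem key_le_iff (a b : String) :
    pvKey a ≤ pvKey b ↔
      (pvKeyIndex a pvPreference < pvKeyIndex b pvPreference ∨
        (pvKeyIndex a pvPreference = pvKeyIndex b pvPreference ∧ a ≤ b)) := by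
  constructor
  · intro h
    rcases eq_or_lt_of_le h with heq | hlt
    · have hab := key_inj heq
      subst hab
      exact Or.inr ⟨rfl, le_refl a⟩
    · rcases (key_lt_iff a b).mp hlt with h1 | ⟨h1, h2⟩
      · exact Or.inl h1
      · exact Or.inr ⟨h1, le_of_lt h2⟩
  · rintro (h | ⟨h, hab⟩)
    · exact le_of_lt ((key_lt_iff a b).mpr (Or.inl h))
    · rcases eq_or_lt_of_le hab with rfl | hlt
      · exact le_refl _
      · exact le_of_lt ((key_lt_iff a b).mpr (Or.inr ⟨h, hlt⟩))

-- the bucket-filling fold: length is preserved and bucket j collects exactly the ids of index j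
theorem fold_buckets_spec (l : List String) :
    ∀ (bs : List (List String)), bs.length = 10 →
      (l.foldl (fun bs id =>
          bs.set (pvKeyIndex id pvPreference) (bs.getD (pvKeyIndex id pvPreference) [] ++ [id])) bs).length = 10 ∧
      ∀ j, j < 10 →
        (l.foldl (fun bs id =>
            bs.set (pvKeyIndex id pvPreference) (bs.getD (pvKeyIndex id pvPreference) [] ++ [id])) bs).getD j [] =
          bs.getD j [] ++ l.filter (fun x => pvKeyIndex x pvPreference == j) := by
  induction l with
  | nil => intro bs hbs; exact ⟨hbs, fun j _ => by simp⟩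
  | cons x t ih =>
    intro bs hbs
    have hi : pvKeyIndex x pvPreference < 10 := by have := keyIdx_le x; omega
    set i := pvKeyIndex x pvPreference with hidef
    have hbs' : (bs.set i (bs.getD i [] ++ [x])).length = 10 := by
      rw [List.length_set]; exact hbs
    obtain ⟨hlen, hgetD⟩ := ih (bs.set i (bs.getD i [] ++ [x])) hbs'
    refine ⟨by simpa using hlen, fun j hj => ?_⟩
    rw [List.foldl_cons]
    rw [hgetD j hj]
    by_cases hji : i = j
    · subst hji
      have hset : (bs.set i (bs.getD i [] ++ [x])).getD i [] = bs.getD i [] ++ [x] := by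
        rw [List.getD_eq_getElem?_getD, List.getElem?_set_self (by omega : i < bs.length)]
        rfl
      rw [hset]
      have hfil : (x :: t).filter (fun y => pvKeyIndex y pvPreference == i) =
          x :: t.filter (fun y => pvKeyIndex y pvPreference == i) := by
        rw [List.filter_cons_of_pos (by simp [← hidef])]
      rw [hfil, List.append_assoc]
      rfl
    · have hset : (bs.set i (bs.getD i [] ++ [x])).getD j [] = bs.getD j [] := by
        rw [List.getD_eq_getElem?_getD, List.getElem?_set_ne hji, ← List.getD_eq_getElem?_getD]
      rw [hset]
      have hfil : (x :: t).filter (fun y => pvKeyIndex y pvPreference == j) =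
          t.filter (fun y => pvKeyIndex y pvPreference == j) := by
        rw [List.filter_cons_of_neg (by simp [← hidef]; exact hji)]
      rw [hfil]

theorem buckets_eq (ids : List String) :
    ids.foldl
      (fun bs id =>
        bs.set (pvPrefIndex id (PySem.List.enumerate pvPreference)).toNat
          (bs.getD (pvPrefIndex id (PySem.List.enumerate pvPreference)).toNat [] ++ [id]))
      (List.replicate 10 []) =
    (List.range 10).map (fun j => ids.filter (fun x => pvKeyIndex x pvPreference == j)) := by
  simp only [prefIndex_toNat]
  obtain ⟨hlen, hgetD⟩ := fold_buckets_spec ids (List.replicate 10 []) (by simp)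
  apply List.ext_getElem
  · rw [hlen]; simp
  · intro j hj hj2
    have hj10 : j < 10 := by rw [hlen] at hj; exact hj
    have h1 := hgetD j hj10
    rw [List.getD_eq_getElem _ _ hj, List.getD_eq_getElem _ _ (by simpa using hj10 : j < (List.replicate 10 ([]:List String)).length)] at h1
    simp only [List.getElem_replicate, List.nil_append] at h1
    rw [h1]
    simp [List.getElem_map, List.getElem_range]

theorem alt_eq (ids : List String) :
    sort_wmobject_ids_alt ids =
      ((List.range 10).map
        (fun j => PySem.List.sorted (ids.filter (fun x => pvKeyIndex x pvPreference == j)) (fun x => x) false)).flatten := by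
  unfold sort_wmobject_ids_alt
  rw [buckets_eq]
  rw [PySem.List.foldl_append_eq_flatMap (fun b => PySem.List.sorted b (fun x => x) false)]
  rw [List.nil_append, List.flatMap_def, List.map_map]
  rfl

theorem flatMap_filter_cons (f : String → Nat) (x : String) (t : List String) :
    ∀ (r : List Nat), r.Nodup → f x ∈ r →
      (r.flatMap (fun j => (x :: t).filter (fun y => f y == j))).Perm
        (x :: r.flatMap (fun j => t.filter (fun y => f y == j))) := by
  intro r
  induction r with
  | nil => intro _ h; exact absurd h (List.not_mem_nil)
  | cons j r' ih =>
    intro hnd hmem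
    rw [List.nodup_cons] at hnd
    rw [List.flatMap_cons, List.flatMap_cons]
    by_cases hxj : f x = j
    · have hfil : (x :: t).filter (fun y => f y == j) = x :: t.filter (fun y => f y == j) := by
        rw [List.filter_cons_of_pos (by simp [hxj])]
      have hrest : r'.flatMap (fun k => (x :: t).filter (fun y => f y == k)) =
          r'.flatMap (fun k => t.filter (fun y => f y == k)) := by
        apply List.flatMap_congr
        intro k hk
        rw [List.filter_cons_of_neg]
        simp only [beq_iff_eq]
        rintro rfl
        exact hnd.1 (hxj ▸ hk)
      rw [hfil, hrest, List.cons_append]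
    · have hfil : (x :: t).filter (fun y => f y == j) = t.filter (fun y => f y == j) := by
        rw [List.filter_cons_of_neg (by simp [hxj])]
      rw [hfil]
      have hmem' : f x ∈ r' := by
        rcases List.mem_cons.mp hmem with h | h
        · exact absurd h hxj
        · exact h
      have hperm := List.Perm.append_left (t.filter (fun y => f y == j)) (ih hnd.2 hmem')
      exact hperm.trans List.perm_middle

theorem perm_flatMap_filter (f : String → Nat) (l : List String) (hf : ∀ y ∈ l, f y < 10) :
    ((List.range 10).flatMap (fun j => l.filter (fun y => f y == j))).Perm l := by
  induction l with
  | nil => simp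
  | cons x t ih =>
    have h1 := flatMap_filter_cons f x t (List.range 10) (List.nodup_range)
      (List.mem_range.mpr (hf x List.mem_cons_self))
    exact h1.trans ((ih (fun y hy => hf y (List.mem_cons_of_mem x hy))).cons x)

theorem alt_perm (ids : List String) : (sort_wmobject_ids_alt ids).Perm ids := by
  rw [alt_eq]
  have h1 : List.Forall₂ List.Perm
      ((List.range 10).map (fun j => PySem.List.sorted (ids.filter (fun x => pvKeyIndex x pvPreference == j)) (fun x => x) false))
      ((List.range 10).map (fun j => ids.filter (fun x => pvKeyIndex x pvPreference == j))) := by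
    induction (List.range 10) with
    | nil => exact List.Forall₂.nil
    | cons j r ihr => exact List.Forall₂.cons (PySem.List.sorted_perm _ _ _) ihr
  refine (List.Perm.flatten_congr h1).trans ?_
  rw [← List.flatMap_def]
  exact perm_flatMap_filter _ ids (fun y _ => by have := keyIdx_le y; omega)

theorem alt_pairwise (ids : List String) :
    (sort_wmobject_ids_alt ids).Pairwise (fun a b => pvKey a ≤ pvKey b) := by
  rw [alt_eq, List.pairwise_flatten]
  constructor
  · intro l hl
    obtain ⟨j, _, rfl⟩ := List.mem_map.mp hl
    apply List.Pairwise.imp_of_mem ?_ (PySem.List.sorted_pairwise (ids.filter (fun x => pvKeyIndex x pvPreference == j)) (fun x => x))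
    intro a b hma hmb hab
    have hja : pvKeyIndex a pvPreference = j := by
      have := List.of_mem_filter ((PySem.List.mem_sorted _ _ _ a).mp hma)
      simpa using this
    have hjb : pvKeyIndex b pvPreference = j := by
      have := List.of_mem_filter ((PySem.List.mem_sorted _ _ _ b).mp hmb)
      simpa using this
    exact (key_le_iff a b).mpr (Or.inr ⟨by rw [hja, hjb], hab⟩)
  · rw [List.pairwise_map]
    apply List.Pairwise.imp ?_ (List.pairwise_lt_range)
    intro i j hij a hma b hmb
    have hia : pvKeyIndex a pvPreference = i := by
      have := List.of_mem_filter ((PySem.List.mem_sorted _ _ _ a).mp hma)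
      simpa using this
    have hjb : pvKeyIndex b pvPreference = j := by
      have := List.of_mem_filter ((PySem.List.mem_sorted _ _ _ b).mp hmb)
      simpa using this
    exact (key_le_iff a b).mpr (Or.inl (by omega))

-- ===== VERDICT (by name: the statement is the Claim_ definition above) =====
theorem sort_wmobject_ids_spec : Claim_equal_sort_wmobject_ids := by
  intro ids _
  unfold Spec_sort_wmobject_ids sort_wmobject_ids
  exact PySem.List.eq_of_perm_of_pairwise_le_of_injective pvKey key_inj
    ((PySem.List.sorted_perm ids pvKey false).trans (alt_perm ids).symm)
    (PySem.List.sorted_pairwise ids pvKey)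
    (alt_pairwise ids)
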